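-- pv_equiv track=rewrite | github.com/Garl4nd/SmallPrograms | hpdr.py | mend_holes
-- ===== SOURCE A (Python) =====
-- def mend_holes(grid,inds): #vytvori intervaly
--     inds=sorted(inds)
--
--     left_points=[]
--     right_points=[]
--     left_points.append(grid[inds[0]])
--
--     for ind,lastind in zip(inds[1:],inds[:-1]):
--         if ind>lastind+1:
--             right_points.append(grid[lastind])
--             left_points.append(grid[ind])
--     right_points.append(grid[inds[-1]])
--     return list(zip(left_points,right_points))
-- ===== SOURCE B (Python) =====
-- def mend_holes(grid, inds):
--     s = set(inds)
--     lefts = sorted(v for v in s if v - 1 not in s)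
--     rights = sorted(v for v in s if v + 1 not in s)
--     return [(grid[a], grid[b]) for a, b in zip(lefts, rights)]
-- ===== Notes on version B (the rewrite author's own statement) =====
-- stated objective: alternative
-- what changed: B detects run boundaries by set membership (left endpoints = elements whose predecessor is not in the set, right endpoints = elements whose successor is not in the set), sorts the two boundary lists and zips them, instead of A's sort followed by a linear scan over adjacent index pairs maintaining parallel left/right point lists.
import Mathlib
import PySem

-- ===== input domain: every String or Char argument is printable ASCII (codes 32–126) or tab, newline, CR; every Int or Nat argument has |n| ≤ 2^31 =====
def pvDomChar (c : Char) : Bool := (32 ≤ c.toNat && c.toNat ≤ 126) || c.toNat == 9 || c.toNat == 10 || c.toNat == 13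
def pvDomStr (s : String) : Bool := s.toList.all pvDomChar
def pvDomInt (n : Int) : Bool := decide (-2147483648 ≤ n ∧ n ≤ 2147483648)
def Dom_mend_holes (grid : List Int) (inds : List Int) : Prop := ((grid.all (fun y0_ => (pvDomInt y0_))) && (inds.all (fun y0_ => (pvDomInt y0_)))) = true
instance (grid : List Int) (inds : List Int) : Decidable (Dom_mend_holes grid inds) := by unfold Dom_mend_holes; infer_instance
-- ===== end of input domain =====

-- B finds the run boundaries by set membership (left endpoints = elements with no predecessor
-- in the set, right endpoints = elements with no successor), sorts the two boundary lists and
-- zips them, instead of A's gap scan over adjacent sorted index pairs (objective: alternative).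

-- ===== PORT A =====
def mend_holes (grid : List Int) (inds : List Int) : List (Int × Int) :=
  let s := PySem.List.sorted inds (fun x => x) false
  -- left_points starts as [grid[inds[0]]], right_points as []
  let lr := ((PySem.List.slice s (some 1) none).zip (PySem.List.slice s none (some (-1)))).foldl
      (fun (acc : List Int × List Int) (p : Int × Int) =>
        if p.1 > p.2 + 1 then
          (acc.1 ++ [PySem.List.pyGetD grid p.1 0], acc.2 ++ [PySem.List.pyGetD grid p.2 0])
        else acc)
      ([PySem.List.pyGetD grid (PySem.List.pyGetD s 0 0) 0], [])
  lr.1.zip (lr.2 ++ [PySem.List.pyGetD grid (PySem.List.pyGetD s (-1) 0) 0])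

-- ===== PORT B =====
def mend_holes_alt (grid : List Int) (inds : List Int) : List (Int × Int) :=
  let s := PySem.Set.ofList inds
  let lefts := PySem.List.sorted (s.filter (fun v => !(PySem.Set.contains s (v - 1)))) (fun x => x) false
  let rights := PySem.List.sorted (s.filter (fun v => !(PySem.Set.contains s (v + 1)))) (fun x => x) false
  (lefts.zip rights).map (fun p => (PySem.List.pyGetD grid p.1 0, PySem.List.pyGetD grid p.2 0))

-- ===== PRECONDITION & SPEC =====
-- Pre_ excludes exactly the inputs on which A raises: empty inds (IndexError at inds[0])
-- and any index out of range for grid (IndexError at grid[i]).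
def Pre_mend_holes (grid : List Int) (inds : List Int) : Prop :=
  inds ≠ [] ∧ ∀ i ∈ inds, PySem.Raise.InRange grid.length i
instance (grid : List Int) (inds : List Int) : Decidable (Pre_mend_holes grid inds) := by
  unfold Pre_mend_holes; infer_instance

def pvWitness_mend_holes : List Int × List Int := ([10, 20, 30, 40], [0, 1, 3, 1])

def Spec_mend_holes (grid : List Int) (inds : List Int) (out : List (Int × Int)) : Prop := out = mend_holes_alt grid inds
instance (grid : List Int) (inds : List Int) (out : List (Int × Int)) : Decidable (Spec_mend_holes grid inds out) := by unfold Spec_mend_holes; infer_instance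

-- ===== CLAIM (what is proved, stated in full; the proofs are below) =====
def Claim_equal_mend_holes : Prop := ∀ (grid : List Int) (inds : List Int), Dom_mend_holes grid inds → Pre_mend_holes grid inds → Spec_mend_holes grid inds (mend_holes grid inds)

-- ===== LEMMAS AND PROOFS =====

-- the common spec: intervals of the consecutive runs, pending run started at `l`, last seen `cur`
def runsFrom (g : Int → Int) (l cur : Int) : List Int → List (Int × Int)
  | [] => [(g l, g cur)]
  | y :: ys => if y > cur + 1 then (g l, g cur) :: runsFrom g y y ys else runsFrom g l y ys

-- adjacent-duplicate removal of the tail of a sorted list, relative to the previous element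
def adjTail (cur : Int) : List Int → List Int
  | [] => []
  | y :: t => if cur = y then adjTail cur t else y :: adjTail y t

theorem mem_cons_adjTail (a : Int) : ∀ (t : List Int) (cur : Int), a ∈ cur :: adjTail cur t ↔ a ∈ cur :: t := by
  intro t
  induction t with
  | nil => intro cur; simp [adjTail]
  | cons y t ih =>
    intro cur
    by_cases h : cur = y
    · subst h
      rw [show adjTail cur (cur :: t) = adjTail cur t from by simp [adjTail]]
      rw [ih cur]
      simp
    · simp only [adjTail, if_neg h]
      have hy := ih y
      simp only [List.mem_cons] at hy ⊢
      tauto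

theorem pairwise_lt_cons_adjTail : ∀ (t : List Int) (cur : Int), (cur :: t).Pairwise (· ≤ ·) →
    (cur :: adjTail cur t).Pairwise (· < ·) := by
  intro t
  induction t with
  | nil => intro cur _; simp [adjTail]
  | cons y t ih =>
    intro cur hp
    rw [List.pairwise_cons] at hp
    obtain ⟨hcur, hyt⟩ := hp
    by_cases h : cur = y
    · subst h
      rw [show adjTail cur (cur :: t) = adjTail cur t from by simp [adjTail]]
      exact ih cur hyt
    · have hcy : cur < y := lt_of_le_of_ne (hcur y (List.mem_cons_self)) h
      simp only [adjTail, if_neg h]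
      rw [List.pairwise_cons]
      refine ⟨?_, ih y hyt⟩
      intro z hz
      have hz' := (mem_cons_adjTail z t y).mp hz
      rcases List.mem_cons.mp hz' with hz1 | hz1
      · exact hz1 ▸ hcy
      · exact lt_of_lt_of_le hcy ((List.pairwise_cons.mp hyt).1 z hz1)

theorem runsFrom_adjTail (g : Int → Int) : ∀ (t : List Int) (l cur : Int), (cur :: t).Pairwise (· ≤ ·) →
    runsFrom g l cur t = runsFrom g l cur (adjTail cur t) := by
  intro t
  induction t with
  | nil => intro l cur _; rfl
  | cons y t ih =>
    intro l cur hp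
    rw [List.pairwise_cons] at hp
    obtain ⟨hcur, hyt⟩ := hp
    by_cases h : cur = y
    · subst h
      rw [show adjTail cur (cur :: t) = adjTail cur t from by simp [adjTail]]
      simp only [runsFrom]
      rw [if_neg (by omega : ¬ cur > cur + 1)]
      exact ih l cur hyt
    · simp only [adjTail, if_neg h, runsFrom]
      by_cases hgt : y > cur + 1
      · simp only [if_pos hgt]
        rw [ih y y hyt]
      · simp only [if_neg hgt]
        exact ih l y hyt

theorem sorted_ofList_eq (inds : List Int) (x : Int) (rest : List Int)
    (h : PySem.List.sorted inds (fun x => x) false = x :: rest) :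
    PySem.List.sorted (PySem.Set.ofList inds) (fun x => x) false = x :: adjTail x rest := by
  have hle : (x :: rest).Pairwise (· ≤ ·) := by
    have := PySem.List.sorted_pairwise inds (fun x => x)
    rw [h] at this
    exact this
  have hlt : (x :: adjTail x rest).Pairwise (· < ·) := pairwise_lt_cons_adjTail rest x hle
  apply PySem.List.sorted_eq_of_perm_of_pairwise_lt
  · refine (List.perm_ext_iff_of_nodup (hlt.imp ne_of_lt) (PySem.Set.nodup_ofList inds)).mpr ?_
    intro a
    rw [mem_cons_adjTail a rest x, ← h, PySem.List.mem_sorted, PySem.Set.mem_ofList]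
  · exact hlt

theorem foldA (g : Int → Int) : ∀ (rest : List Int) (cur : Int) (doneL doneR : List Int) (pend : Int),
    doneL.length = doneR.length →
    ((rest.zip (cur :: rest)).foldl
        (fun (acc : List Int × List Int) (p : Int × Int) =>
          if p.1 > p.2 + 1 then (acc.1 ++ [g p.1], acc.2 ++ [g p.2]) else acc)
        (doneL ++ [g pend], doneR)).1.zip
      (((rest.zip (cur :: rest)).foldl
        (fun (acc : List Int × List Int) (p : Int × Int) =>
          if p.1 > p.2 + 1 then (acc.1 ++ [g p.1], acc.2 ++ [g p.2]) else acc)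
        (doneL ++ [g pend], doneR)).2 ++ [g ((cur :: rest).getLast (List.cons_ne_nil _ _))])
    = doneL.zip doneR ++ runsFrom g pend cur rest := by
  intro rest
  induction rest with
  | nil =>
    intro cur doneL doneR pend hlen
    simp only [List.zip_nil_left, List.foldl_nil, List.getLast_singleton, runsFrom]
    rw [List.zip_append hlen]
    simp
  | cons y ys ih =>
    intro cur doneL doneR pend hlen
    simp only [List.zip_cons_cons, List.foldl_cons, List.getLast_cons_cons, runsFrom]
    by_cases hgt : y > cur + 1
    · simp only [if_pos hgt]
      have h2 := ih y (doneL ++ [g pend]) (doneR ++ [g cur]) y (by simp [hlen])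
      rw [show doneL ++ [g pend] ++ [g y] = (doneL ++ [g pend]) ++ [g y] by simp] at h2
      rw [h2, List.zip_append hlen]
      simp
    · simp only [if_neg hgt]
      exact ih y doneL doneR pend hlen

theorem notContains_iff (S : List Int) (x : Int) : ((!(PySem.Set.contains S x)) = true) ↔ x ∉ S := by
  simp

theorem runsFrom_map (g : Int → Int) : ∀ (t : List Int) (l cur : Int),
    (runsFrom (fun x => x) l cur t).map (fun p => (g p.1, g p.2)) = runsFrom g l cur t := by
  intro t
  induction t with
  | nil => intro l cur; simp [runsFrom]
  | cons y ys ih =>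
    intro l cur
    simp only [runsFrom]
    by_cases hgt : y > cur + 1
    · simp only [if_pos hgt, List.map_cons, ih]
    · simp only [if_neg hgt, ih]

-- B's boundary filters on a strictly sorted list, zipped, give exactly the runs
theorem zipRuns (S : List Int) : ∀ (t : List Int) (cur l : Int),
    (cur :: t).Pairwise (· < ·) →
    (∀ v : Int, cur ≤ v → (v ∈ S ↔ v ∈ cur :: t)) →
    (l :: t.filter (fun v => !(PySem.Set.contains S (v - 1)))).zip
      ((cur :: t).filter (fun v => !(PySem.Set.contains S (v + 1))))
    = runsFrom (fun x => x) l cur t := by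
  intro t
  induction t with
  | nil =>
    intro cur l _ hmem
    have hR : (!(PySem.Set.contains S (cur + 1))) = true := by
      rw [notContains_iff]
      intro hc
      have := (hmem (cur + 1) (by omega)).mp hc
      simp at this
    rw [show List.filter (fun v => !(PySem.Set.contains S (v + 1))) [cur] = [cur] from by
      rw [List.filter_cons, if_pos hR]; rfl]
    simp [runsFrom]
  | cons y ys ih =>
    intro cur l hp hmem
    have hcy : cur < y := (List.pairwise_cons.mp hp).1 y List.mem_cons_self
    have hyys : (y :: ys).Pairwise (· < ·) := (List.pairwise_cons.mp hp).2
    have hys_gt : ∀ z ∈ ys, y < z := fun z hz => (List.pairwise_cons.mp hyys).1 z hz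
    have hmem' : ∀ v : Int, y ≤ v → (v ∈ S ↔ v ∈ y :: ys) := by
      intro v hv
      rw [hmem v (by omega)]
      constructor
      · intro h
        rcases List.mem_cons.mp h with h1 | h1
        · omega
        · exact h1
      · intro h; exact List.mem_cons_of_mem _ h
    by_cases hgt : y > cur + 1
    · -- a gap: cur closes an interval, y opens the next one
      have hR : (!(PySem.Set.contains S (cur + 1))) = true := by
        rw [notContains_iff]
        intro hc
        have h1 := (hmem (cur + 1) (by omega)).mp hc
        rcases List.mem_cons.mp h1 with h2 | h2
        · omega
        · rcases List.mem_cons.mp h2 with h3 | h3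
          · omega
          · have := hys_gt _ h3; omega
      have hL : (!(PySem.Set.contains S (y - 1))) = true := by
        rw [notContains_iff]
        intro hc
        have h1 := (hmem (y - 1) (by omega)).mp hc
        rcases List.mem_cons.mp h1 with h2 | h2
        · omega
        · rcases List.mem_cons.mp h2 with h3 | h3
          · omega
          · have := hys_gt _ h3; omega
      simp only [runsFrom, if_pos hgt]
      rw [show List.filter (fun v => !(PySem.Set.contains S (v - 1))) (y :: ys)
            = y :: List.filter (fun v => !(PySem.Set.contains S (v - 1))) ys from by
          rw [List.filter_cons, if_pos hL],
        show List.filter (fun v => !(PySem.Set.contains S (v + 1))) (cur :: y :: ys)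
            = cur :: List.filter (fun v => !(PySem.Set.contains S (v + 1))) (y :: ys) from by
          rw [List.filter_cons, if_pos hR],
        List.zip_cons_cons, ih y y hyys hmem']
    · -- consecutive: y extends the pending run
      have hy : y = cur + 1 := by omega
      have hR : ¬ ((!(PySem.Set.contains S (cur + 1))) = true) := by
        have hc : (cur + 1) ∈ S := (hmem (cur + 1) (by omega)).mpr (by simp [hy])
        simp [hc]
      have hL : ¬ ((!(PySem.Set.contains S (y - 1))) = true) := by
        have hc : (y - 1) ∈ S := (hmem (y - 1) (by omega)).mpr
          (by simp [show y - 1 = cur by omega])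
        simp [hc]
      simp only [runsFrom, if_neg hgt]
      rw [show List.filter (fun v => !(PySem.Set.contains S (v - 1))) (y :: ys)
            = List.filter (fun v => !(PySem.Set.contains S (v - 1))) ys from by
          rw [List.filter_cons, if_neg hL],
        show List.filter (fun v => !(PySem.Set.contains S (v + 1))) (cur :: y :: ys)
            = List.filter (fun v => !(PySem.Set.contains S (v + 1))) (y :: ys) from by
          rw [List.filter_cons, if_neg hR]]
      exact ih y l hyys hmem'

theorem zip_dropLast_cons {α : Type} : ∀ (l : List α) (c : α), l.zip ((c :: l).dropLast) = l.zip (c :: l) := by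
  intro l
  induction l with
  | nil => intro c; simp
  | cons a l ih =>
    intro c
    rw [List.dropLast_cons_of_ne_nil (List.cons_ne_nil a l)]
    simp only [List.zip_cons_cons]
    rw [ih a]

-- sorting a filtered set = filtering the sorted set (elements are distinct)
theorem sorted_filter_comm (inds : List Int) (p : Int → Bool) :
    PySem.List.sorted ((PySem.Set.ofList inds).filter p) (fun x => x) false
    = (PySem.List.sorted (PySem.Set.ofList inds) (fun x => x) false).filter p := by
  apply PySem.List.sorted_eq_of_perm_of_pairwise_lt
  · exact (PySem.List.sorted_perm (PySem.Set.ofList inds) (fun x => x) false).filter p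
  · exact (PySem.List.sorted_ofList_pairwise_lt inds).filter p

-- ===== VERDICT (by name: the statement is the Claim_ definition above) =====
theorem mend_holes_spec : Claim_equal_mend_holes := by
  intro grid inds _ hpre
  obtain ⟨hne, _⟩ := hpre
  unfold Spec_mend_holes
  simp only [mend_holes, mend_holes_alt]
  rcases hsrt : PySem.List.sorted inds (fun x => x) false with _ | ⟨x, rest⟩
  · exact absurd ((PySem.List.sorted_eq_nil_iff inds _ _).mp hsrt) hne
  · have hle : (x :: rest).Pairwise (· ≤ ·) := by
      have := PySem.List.sorted_pairwise inds (fun x => x)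
      rw [hsrt] at this
      exact this
    -- A side
    rw [PySem.List.slice_from_one, PySem.List.slice_to_neg_one]
    simp only [List.tail_cons, zip_dropLast_cons, PySem.List.pyGetD_zero_cons,
      PySem.List.pyGetD_neg_one (x :: rest) 0 (List.cons_ne_nil x rest)]
    have hA := foldA (fun i => PySem.List.pyGetD grid i 0) rest x [] [] x rfl
    simp only [List.nil_append, List.zip_nil_left] at hA
    rw [hA]
    -- B side
    have hu := sorted_ofList_eq inds x rest hsrt
    rw [sorted_filter_comm, sorted_filter_comm, hu]
    have hlt : (x :: adjTail x rest).Pairwise (· < ·) := pairwise_lt_cons_adjTail rest x hle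
    have hmem0 : ∀ v : Int, v ∈ PySem.Set.ofList inds ↔ v ∈ x :: adjTail x rest := by
      intro v
      rw [PySem.Set.mem_ofList, ← PySem.List.mem_sorted inds (fun x => x) false v, hsrt,
        mem_cons_adjTail]
    have hpLx : (!(PySem.Set.contains (PySem.Set.ofList inds) (x - 1))) = true := by
      rw [notContains_iff]
      intro hc
      have h3 := (hmem0 (x - 1)).mp hc
      rcases List.mem_cons.mp h3 with h4 | h4
      · omega
      · have := (List.pairwise_cons.mp hlt).1 _ h4; omega
    rw [List.filter_cons, if_pos hpLx]
    rw [zipRuns (PySem.Set.ofList inds) (adjTail x rest) x x hlt (fun v _ => hmem0 v),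
      runsFrom_map (fun i => PySem.List.pyGetD grid i 0) (adjTail x rest) x x]
    exact runsFrom_adjTail (fun i => PySem.List.pyGetD grid i 0) rest x x hle
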